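-- pv_equiv track=rewrite | github.com/JanuarioJVBarros/amarhouse_db_management | scrapers/ecolux/parser.py | _merge_header_tokens
-- ===== SOURCE A (Python) =====
-- def _merge_header_tokens(headers):
--     merged = []
--     index = 0
--
--     while index < len(headers):
--         current = headers[index]
--         next_value = headers[index + 1] if index + 1 < len(headers) else None
--
--         if current == "Temp" and next_value == "(K)":
--             merged.append("Temp (K)")
--             index += 2
--             continue
--
--         merged.append(current)
--         index += 1
--
--     return merged
-- ===== SOURCE B (Python) =====
-- def _merge_header_tokens(headers):
--     merged = []
--     for token in headers:
--         if token == "(K)" and merged and merged[-1] == "Temp":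
--             merged[-1] = "Temp (K)"
--         else:
--             merged.append(token)
--     return merged
-- ===== Notes on version B (the rewrite author's own statement) =====
-- stated objective: simpler
-- what changed: Replaces A's index-based while loop with lookahead and skip-by-2 by a single for-each loop that looks back at the output and rewrites its last element on a merge.
import Mathlib
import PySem

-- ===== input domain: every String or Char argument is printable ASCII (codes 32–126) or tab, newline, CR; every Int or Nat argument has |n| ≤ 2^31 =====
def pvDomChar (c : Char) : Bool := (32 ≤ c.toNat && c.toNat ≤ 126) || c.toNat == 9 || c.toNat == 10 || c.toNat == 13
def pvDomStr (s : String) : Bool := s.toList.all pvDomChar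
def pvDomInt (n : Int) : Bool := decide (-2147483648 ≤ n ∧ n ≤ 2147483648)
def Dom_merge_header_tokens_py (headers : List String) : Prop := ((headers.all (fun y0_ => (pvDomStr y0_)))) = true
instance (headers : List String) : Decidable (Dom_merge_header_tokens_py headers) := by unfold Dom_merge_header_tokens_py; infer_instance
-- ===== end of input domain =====

-- B replaces A's index/lookahead while loop by a for-each loop that looks back at the
-- output built so far and rewrites its last element on a merge (objective: simpler).
-- ===== PORT A =====
-- A's while loop: state (merged, index), lookahead at index+1, skip by 2 on a merge.
def mergeHeaderLoopA (headers : List String) (merged : List String) (index : Nat) :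
    List String :=
  if h : index < headers.length then
    let current := headers[index]
    let next_value : Option String :=
      if h2 : index + 1 < headers.length then some headers[index + 1] else none
    if current = "Temp" ∧ next_value = some "(K)" then
      mergeHeaderLoopA headers (merged ++ ["Temp (K)"]) (index + 2)
    else
      mergeHeaderLoopA headers (merged ++ [current]) (index + 1)
  else merged
termination_by headers.length - index

def merge_header_tokens_py (headers : List String) : List String :=
  mergeHeaderLoopA headers [] 0

-- ===== PORT B =====
-- one step of B's for-loop: lookback at merged's last element, in-place rewrite on merge
def mergeHeaderStepB (merged : List String) (token : String) : List String :=
  if token = "(K)" ∧ merged.getLast? = some "Temp" then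
    merged.dropLast ++ ["Temp (K)"]
  else merged ++ [token]

def merge_header_tokens_py_alt (headers : List String) : List String :=
  headers.foldl mergeHeaderStepB []

-- ===== PRECONDITION & SPEC =====
def Spec_merge_header_tokens_py (headers : List String) (out : List String) : Prop := out = merge_header_tokens_py_alt headers
instance (headers : List String) (out : List String) : Decidable (Spec_merge_header_tokens_py headers out) := by unfold Spec_merge_header_tokens_py; infer_instance

-- ===== CLAIM (what is proved, stated in full; the proofs are below) =====
def Claim_equal_merge_header_tokens_py : Prop := ∀ (headers : List String), Dom_merge_header_tokens_py headers → Spec_merge_header_tokens_py headers (merge_header_tokens_py headers)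

-- ===== LEMMAS AND PROOFS =====

-- ===== VERDICT (by name: the statement is the Claim_ definition above) =====
-- common characterisation: structural recursion consuming one token,
-- merging when the head is "Temp" and the next token is "(K)"
def mergeSpec : List String → List String
  | [] => []
  | x :: rest =>
    if x = "Temp" ∧ rest.head? = some "(K)" then "Temp (K)" :: mergeSpec rest.tail
    else x :: mergeSpec rest
termination_by l => l.length
decreasing_by
  all_goals simp

theorem loopA_eq_spec_aux (headers : List String) (n : Nat) :
    ∀ (merged : List String) (index : Nat), headers.length ≤ index + n →
      mergeHeaderLoopA headers merged index = merged ++ mergeSpec (headers.drop index) := by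
  induction n with
  | zero =>
    intro merged index hn
    rw [mergeHeaderLoopA, dif_neg (by omega), List.drop_of_length_le (by omega)]
    simp [mergeSpec]
  | succ n ih =>
    intro merged index hn
    rw [mergeHeaderLoopA]
    by_cases h : index < headers.length
    · simp only [dif_pos h]
      have hdrop : headers.drop index = headers[index] :: headers.drop (index + 1) :=
        List.drop_eq_getElem_cons h
      by_cases hc : headers[index] = "Temp" ∧
          (if _ : index + 1 < headers.length then some headers[index + 1] else none) =
            some "(K)"
      · rw [if_pos hc]
        have h2 : index + 1 < headers.length := by
          by_contra h2
          rw [dif_neg h2] at hc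
          exact absurd hc.2 (by simp)
        have hnv : headers[index + 1] = "(K)" := by
          have := hc.2
          rw [dif_pos h2] at this
          exact Option.some.injEq _ _ ▸ this
        have hdrop2 : headers.drop (index + 1) =
            headers[index + 1] :: headers.drop (index + 2) :=
          List.drop_eq_getElem_cons h2
        rw [ih _ _ (by omega), hdrop, hdrop2, hc.1, hnv]
        rw [mergeSpec]
        simp
      · rw [if_neg hc, ih _ _ (by omega), hdrop]
        have hns : ¬(headers[index] = "Temp" ∧
            (headers.drop (index + 1)).head? = some "(K)") := by
          intro ⟨h1, h2'⟩
          apply hc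
          refine ⟨h1, ?_⟩
          have h2 : index + 1 < headers.length := by
            rcases hh : headers.drop (index + 1) with _ | ⟨y, rest⟩
            · rw [hh] at h2'; simp at h2'
            · have := congrArg List.length hh
              simp at this
              omega
          simp only [List.head?_drop] at h2'
          rw [dif_pos h2, ← h2', List.getElem?_eq_getElem h2]
        rw [mergeSpec, if_neg hns]
        simp
    · rw [dif_neg h, List.drop_of_length_le (by omega)]
      simp [mergeSpec]

theorem foldB_eq_spec_aux (n : Nat) :
    ∀ (ts merged : List String), ts.length ≤ n →
      (merged.getLast? = some "Temp" → ts.head? ≠ some "(K)") →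
      ts.foldl mergeHeaderStepB merged = merged ++ mergeSpec ts := by
  induction n with
  | zero =>
    intro ts merged hn _
    have : ts = [] := List.eq_nil_of_length_eq_zero (by omega)
    subst this
    simp [mergeSpec]
  | succ n ih =>
    intro ts merged hn hlast
    rcases ts with _ | ⟨t, rest⟩
    · simp [mergeSpec]
    · rw [List.foldl_cons]
      have hstep : mergeHeaderStepB merged t = merged ++ [t] := by
        rw [mergeHeaderStepB, if_neg]
        intro ⟨h1, h2⟩
        exact hlast h2 (by simp [h1])
      rw [hstep]
      by_cases hm : t = "Temp" ∧ rest.head? = some "(K)"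
      · obtain ⟨rfl, hh⟩ := hm
        rcases rest with _ | ⟨r, rest'⟩
        · simp at hh
        have hr : r = "(K)" := by simpa using hh
        subst hr
        rw [List.foldl_cons]
        have hstep2 : mergeHeaderStepB (merged ++ ["Temp"]) "(K)" =
            merged ++ ["Temp (K)"] := by
          rw [mergeHeaderStepB, if_pos (by simp)]
          simp
        rw [hstep2, ih _ _ (by simp at hn ⊢; omega) (by simp)]
        rw [mergeSpec]
        simp
      · rw [ih _ _ (by simp at hn ⊢; omega)]
        · rw [mergeSpec, if_neg hm]
          simp
        · intro hl hk
          have ht : t = "Temp" := by simpa using hl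
          exact hm ⟨ht, hk⟩

theorem merge_header_tokens_py_spec : Claim_equal_merge_header_tokens_py := by
  intro headers _
  unfold Spec_merge_header_tokens_py merge_header_tokens_py merge_header_tokens_py_alt
  rw [loopA_eq_spec_aux headers headers.length _ _ (by omega),
      foldB_eq_spec_aux headers.length headers [] (by omega) (by simp)]
  simp
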